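-- pv_equiv track=rewrite | github.com/galonsky/adventofcode | 2019/16/day16.py | get_new_pattern
-- ===== SOURCE A (Python) =====
-- base_pattern = [0, 1, 0, -1]
--
-- def get_new_pattern(times_to_repeat, num_len) -> int:
--     i = 0
--     while True:
--         for p in base_pattern:
--             for _ in range(times_to_repeat):
--                 if i == 0:
--                     i += 1
--                     continue
--                 yield int(p)
--                 if i == num_len:
--                     return
--                 i += 1
-- ===== SOURCE B (Python) =====
-- base_pattern = [0, 1, 0, -1]
--
-- def get_new_pattern(times_to_repeat, num_len) -> int:
--     # single counter + modular index arithmetic instead of nested pattern/repeat loops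
--     n = 1
--     while True:
--         yield int(base_pattern[(n // times_to_repeat) % 4])
--         if n == num_len:
--             return
--         n += 1
-- ===== Notes on version B (the rewrite author's own statement) =====
-- stated objective: simpler
-- what changed: Replaced the nested pattern/repeat counting loops and the one-time i==0 skip by a single counter n=1..num_len that indexes base_pattern directly via (n // times_to_repeat) % 4.
import Mathlib
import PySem

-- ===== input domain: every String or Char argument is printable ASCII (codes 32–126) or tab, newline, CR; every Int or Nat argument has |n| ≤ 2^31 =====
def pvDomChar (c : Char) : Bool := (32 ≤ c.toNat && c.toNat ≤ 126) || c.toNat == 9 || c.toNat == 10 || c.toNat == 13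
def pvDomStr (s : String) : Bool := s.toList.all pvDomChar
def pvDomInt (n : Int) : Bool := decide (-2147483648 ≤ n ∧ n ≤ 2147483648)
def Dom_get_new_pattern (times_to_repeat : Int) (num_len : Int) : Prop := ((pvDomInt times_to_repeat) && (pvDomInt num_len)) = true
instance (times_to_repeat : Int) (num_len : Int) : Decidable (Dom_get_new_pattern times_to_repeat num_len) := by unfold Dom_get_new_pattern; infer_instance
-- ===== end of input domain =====

-- B replaces A's nested pattern/repeat loops and one-time i==0 skip by one counter with
-- modular index arithmetic into base_pattern (objective: simpler; return value only —
-- both Pythons are generators, compared as the list of yielded values).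

-- base_pattern (module constant shared by both sources)
def pvBase : List Int := [0, 1, 0, -1]

-- ===== PORT A =====
-- inner 'for _ in range(times_to_repeat)' loop; Bool = the generator returned
def pvInner (num_len p : Int) : Nat → Int → List Int → Int × List Int × Bool
  | 0, i, acc => (i, acc, false)
  | k+1, i, acc =>
    if i = 0 then pvInner num_len p k (i+1) acc
    else
      let acc' := acc ++ [p]
      if i = num_len then (i, acc', true)
      else pvInner num_len p k (i+1) acc'

-- 'for p in base_pattern' loop
def pvPat (t num_len : Int) : List Int → Int → List Int → Int × List Int × Bool
  | [], i, acc => (i, acc, false)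
  | p :: ps, i, acc =>
    let res := pvInner num_len p t.toNat i acc
    if res.2.2 then res else pvPat t num_len ps res.1 res.2.1

-- 'while True' loop; fuel only makes it total — under Pre_ the loop returns before fuel runs out
def pvWhile (t num_len : Int) : Nat → Int → List Int → List Int
  | 0, _, acc => acc
  | f+1, i, acc =>
    let res := pvPat t num_len pvBase i acc
    if res.2.2 then res.2.1 else pvWhile t num_len f res.1 res.2.1

def get_new_pattern (times_to_repeat : Int) (num_len : Int) : List Int :=
  pvWhile times_to_repeat num_len (num_len.toNat + 1) 0 []

-- ===== PORT B =====
-- int(base_pattern[(n // times_to_repeat) % 4])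
def pvVal (t n : Int) : Int :=
  PySem.List.pyGetD pvBase (PySem.Int.mod (PySem.Int.floordiv n t) 4) 0

-- B's 'while True' loop; fuel only makes it total — under Pre_ it returns at n = num_len exactly
def pvAlt (t num_len : Int) : Nat → Int → List Int
  | 0, _ => []
  | f+1, n =>
    let v := pvVal t n
    if n = num_len then [v] else v :: pvAlt t num_len f (n+1)

def get_new_pattern_alt (times_to_repeat : Int) (num_len : Int) : List Int :=
  pvAlt times_to_repeat num_len num_len.toNat 1

-- ===== PRECONDITION & SPEC =====
-- A's generator never finishes when times_to_repeat ≤ 0 (no yields, loops forever) or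
-- num_len ≤ 0 (yields forever): it produces a finite list exactly on these inputs.
def Pre_get_new_pattern (times_to_repeat : Int) (num_len : Int) : Prop :=
  1 ≤ times_to_repeat ∧ 1 ≤ num_len
instance (times_to_repeat : Int) (num_len : Int) : Decidable (Pre_get_new_pattern times_to_repeat num_len) := by
  unfold Pre_get_new_pattern; infer_instance

def pvWitness_get_new_pattern : Int × Int := (3, 8)

def Spec_get_new_pattern (times_to_repeat : Int) (num_len : Int) (out : List Int) : Prop := out = get_new_pattern_alt times_to_repeat num_len
instance (times_to_repeat : Int) (num_len : Int) (out : List Int) : Decidable (Spec_get_new_pattern times_to_repeat num_len out) := by unfold Spec_get_new_pattern; infer_instance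

-- ===== CLAIM (what is proved, stated in full; the proofs are below) =====
def Claim_equal_get_new_pattern : Prop := ∀ (times_to_repeat : Int) (num_len : Int), Dom_get_new_pattern times_to_repeat num_len → Pre_get_new_pattern times_to_repeat num_len → Spec_get_new_pattern times_to_repeat num_len (get_new_pattern times_to_repeat num_len)

-- ===== LEMMAS AND PROOFS =====

-- the common closed form: the k values B yields starting at counter n
def pvSeg (t n : Int) (k : Nat) : List Int := (List.range k).map (fun (j : Nat) => pvVal t (n + (j : Int)))

lemma pvSeg_zero (t n : Int) : pvSeg t n 0 = [] := rfl

lemma pvSeg_succ (t n : Int) (k : Nat) : pvSeg t n (k+1) = pvVal t n :: pvSeg t (n+1) k := by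
  simp only [pvSeg, List.range_succ_eq_map, List.map_cons, List.map_map, Nat.cast_zero, add_zero]
  refine congrArg₂ _ rfl ?_
  apply List.map_congr_left
  intro j _
  simp only [Function.comp_apply]
  congr 1
  push_cast
  ring

lemma pvSeg_one (t n : Int) : pvSeg t n 1 = [pvVal t n] := by
  rw [pvSeg_succ, pvSeg_zero]

lemma pvSeg_snoc (t n : Int) (k : Nat) : pvSeg t n (k+1) = pvSeg t n k ++ [pvVal t (n + (k:Int))] := by
  simp [pvSeg, List.range_succ]

lemma pvSeg_add (t n : Int) (a b : Nat) :
    pvSeg t n (a + b) = pvSeg t n a ++ pvSeg t (n + (a:Int)) b := by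
  induction b with
  | zero => simp [pvSeg_zero]
  | succ b ih =>
      have h1 : a + (b + 1) = (a + b) + 1 := by omega
      rw [h1, pvSeg_snoc, ih, pvSeg_snoc, List.append_assoc]
      congr 3
      push_cast
      ring_nf

-- value of B's formula on the block of t consecutive counters for pattern position j
lemma pvVal_block (t w j r : Int) (ht : 1 ≤ t) (hj0 : 0 ≤ j) (hj : j < 4)
    (hr0 : 0 ≤ r) (hr : r < t) :
    pvVal t (4*t*w + t*j + r) = PySem.List.pyGetD pvBase j 0 := by
  have h1 : PySem.Int.floordiv (4*t*w + t*j + r) t = 4*w + j := by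
    rw [PySem.Int.floordiv_eq_iff_of_pos (by omega)]
    constructor <;> nlinarith
  have h2 : PySem.Int.mod (4*w + j) 4 = j := by
    rw [PySem.Int.mod_eq_emod_of_pos (by omega)]
    omega
  rw [pvVal, h1, h2]

-- A's inner loop away from the i == 0 start: yields p at counters i, i+1, …
lemma pvInner_steady (t num_len p : Int) (k : Nat) :
    ∀ (i : Int) (acc : List Int), 1 ≤ i →
    (∀ j : Nat, j < k → pvVal t (i + (j:Int)) = p) →
    pvInner num_len p k i acc =
      if i ≤ num_len ∧ num_len < i + (k:Int) then
        (num_len, acc ++ pvSeg t i (num_len + 1 - i).toNat, true)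
      else (i + (k:Int), acc ++ pvSeg t i k, false) := by
  induction k with
  | zero =>
      intro i acc hi _
      rw [pvInner, if_neg (by push_cast; omega)]
      simp [pvSeg_zero]
  | succ k ih =>
      intro i acc hi hp
      have hp0 : pvVal t i = p := by simpa using hp 0 (by omega)
      rw [pvInner, if_neg (by omega : ¬ i = 0)]
      by_cases hdone : i = num_len
      · rw [if_pos hdone]
        rw [if_pos (by push_cast; omega)]
        subst hdone
        have h1 : (i + 1 - i).toNat = 1 := by omega
        rw [h1, pvSeg_one, hp0]
      · rw [if_neg hdone]
        rw [ih (i+1) (acc ++ [p]) (by omega) (fun j hj => by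
              have h := hp (j+1) (by omega)
              rw [← h]; congr 1; push_cast; ring)]
        have hseg : (acc ++ [p]) ++ pvSeg t (i+1) k = acc ++ pvSeg t i (k+1) := by
          rw [pvSeg_succ, hp0, List.append_assoc]
          rfl
        by_cases hc : i + 1 ≤ num_len ∧ num_len < i + 1 + (k:Int)
        · rw [if_pos hc, if_pos (by push_cast at hc ⊢; omega)]
          have h2 : (num_len + 1 - i).toNat = (num_len + 1 - (i+1)).toNat + 1 := by omega
          rw [h2, pvSeg_succ, hp0]
          simp
        · rw [if_neg hc, if_neg (by push_cast at hc ⊢; omega)]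
          rw [hseg]
          refine congrArg₂ _ (by push_cast; ring) rfl

-- A's pattern loop over a suffix ps of base_pattern, in steady state
lemma pvPat_blocks (t N : Int) (ht : 1 ≤ t) (ps : List Int) :
    ∀ (i : Int) (acc : List Int), 1 ≤ i → i ≤ N →
    (∀ m : Nat, m < ps.length → ∀ r : Nat, r < t.toNat → pvVal t (i + t*(m:Int) + (r:Int)) = ps.getD m 0) →
    pvPat t N ps i acc =
      if N < i + t * (ps.length : Int) then (N, acc ++ pvSeg t i (N + 1 - i).toNat, true)
      else (i + t * (ps.length : Int), acc ++ pvSeg t i (t * (ps.length : Int)).toNat, false) := by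
  have ht' : ((t.toNat : Nat) : Int) = t := Int.toNat_of_nonneg (by omega)
  induction ps with
  | nil =>
      intro i acc hi hiN _
      rw [pvPat, if_neg (by simp only [List.length_nil, Nat.cast_zero, mul_zero, add_zero]; omega)]
      simp [pvSeg_zero]
  | cons p ps ih =>
      intro i acc hi hiN hps
      rw [pvPat]
      have hp : ∀ j : Nat, j < t.toNat → pvVal t (i + (j:Int)) = p := fun j hj => by
        simpa using hps 0 (by simp) j hj
      rw [pvInner_steady t N p t.toNat i acc hi hp]
      set L : Int := (ps.length : Int) with hL
      have hL0 : 0 ≤ L := by positivity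
      have htL : 0 ≤ t * L := by positivity
      have hcast : (((p :: ps).length : Nat) : Int) = L + 1 := by
        simp [hL]
      by_cases hd : i ≤ N ∧ N < i + ((t.toNat : Nat) : Int)
      · have hcnd : N < i + t * (L + 1) := by
          rw [ht'] at hd
          nlinarith [hd.2, htL]
        rw [if_pos hd, hcast, if_pos hcnd]
        rfl
      · rw [if_neg hd, hcast]
        rw [ht'] at hd
        have hitN : i + t ≤ N := by omega
        show pvPat t N ps (i + ((t.toNat:Nat):Int)) (acc ++ pvSeg t i t.toNat) = _
        rw [ih (i + ((t.toNat:Nat):Int)) (acc ++ pvSeg t i t.toNat) (by omega) (by omega)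
              (fun m hm r hr => by
                have h := hps (m+1) (by simpa using hm) r hr
                simp only [List.getD_cons_succ] at h
                rw [← h]
                congr 1
                push_cast [ht']
                ring)]
        by_cases hc : N < i + t * (L + 1)
        · rw [if_pos (by rw [ht']; nlinarith), if_pos hc]
          have hsplit : (N + 1 - i).toNat = t.toNat + (N + 1 - (i + t)).toNat := by omega
          rw [hsplit, pvSeg_add]
          simp [ht', List.append_assoc]
        · rw [if_neg (by rw [ht']; intro h; exact hc (by nlinarith)), if_neg hc]
          have hsplit : (t * (L + 1)).toNat = t.toNat + (t * L).toNat := by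
            have h3 : t * (L + 1) = t + t * L := by ring
            omega
          have he1 : i + t * (L + 1) = i + ((t.toNat:Nat):Int) + t * L := by rw [ht']; ring
          rw [hsplit, pvSeg_add, he1]
          simp [ht', List.append_assoc]

-- A's very first pattern loop (starting at i = 0, with the one-time skip)
lemma pvPat_first (t N : Int) (ht : 1 ≤ t) (hN : 1 ≤ N) (acc : List Int) :
    pvPat t N pvBase 0 acc =
      if N < 4*t then (N, acc ++ pvSeg t 1 N.toNat, true)
      else (4*t, acc ++ pvSeg t 1 (4*t - 1).toNat, false) := by
  have ht' : ((t.toNat : Nat) : Int) = t := Int.toNat_of_nonneg (by omega)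
  obtain ⟨m, hm⟩ : ∃ m, t.toNat = m + 1 := ⟨t.toNat - 1, by omega⟩
  have hm' : (m : Int) = t - 1 := by omega
  show pvPat t N (0 :: [1, 0, -1]) 0 acc = _
  rw [pvPat, hm, pvInner, if_pos rfl, zero_add]
  rw [pvInner_steady t N 0 m 1 acc (le_refl 1) (fun j hj => by
        have h := pvVal_block t 0 0 (1 + (j:Int)) ht (le_refl 0) (by omega) (by omega) (by omega)
        have e : 4*t*0 + t*0 + (1 + (j:Int)) = 1 + (j:Int) := by ring
        rw [e] at h
        rw [h]
        decide)]
  by_cases h1 : N < t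
  · have hcnd : 1 ≤ N ∧ N < 1 + (m:Int) := ⟨hN, by omega⟩
    rw [if_pos hcnd]
    have e : (N + 1 - 1).toNat = N.toNat := by omega
    rw [e, if_pos (by nlinarith : N < 4*t)]
    rfl
  · have hcnd : ¬(1 ≤ N ∧ N < 1 + (m:Int)) := by omega
    rw [if_neg hcnd]
    show pvPat t N [1, 0, -1] (1 + (m:Int)) (acc ++ pvSeg t 1 m) = _
    rw [pvPat_blocks t N ht [1, 0, -1] (1 + (m:Int)) (acc ++ pvSeg t 1 m) (by omega) (by omega)
          (fun m' hmm r hr => by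
            have hm3 : m' < 3 := by simpa using hmm
            have h := pvVal_block t 0 ((m':Int) + 1) (r:Int) ht (by omega) (by omega) (by omega)
              (by omega)
            have e : 4*t*0 + t*((m':Int) + 1) + (r:Int) = (1 + (m:Int)) + t*(m':Int) + (r:Int) := by
              have : (m:Int) = t - 1 := hm'
              ring_nf
              omega
            rw [e] at h
            rw [h]
            interval_cases m' <;> decide)]
    have hlen : ((List.length [(1:Int), 0, -1] : Nat) : Int) = 3 := by norm_num
    rw [hlen]
    have h14 : 1 + (m:Int) + t*3 = 4*t := by omega
    by_cases h2 : N < 4*t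
    · rw [if_pos (by omega : N < 1 + (m:Int) + t*3), if_pos h2]
      have hsplit : N.toNat = m + (N + 1 - (1 + (m:Int))).toNat := by omega
      rw [hsplit, pvSeg_add, List.append_assoc]
    · rw [if_neg (by omega : ¬ N < 1 + (m:Int) + t*3), if_neg h2]
      have hsplit : (4*t - 1).toNat = m + (t*3).toNat := by omega
      rw [hsplit, pvSeg_add, h14, List.append_assoc]

-- A's while loop in steady state
lemma pvWhile_steady (t N : Int) (ht : 1 ≤ t) (f : Nat) :
    ∀ (w i : Int) (acc : List Int), 1 ≤ w → i = 4*t*w → i ≤ N → N - i < 4*t*(f:Int) →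
    pvWhile t N f i acc = acc ++ pvSeg t i (N + 1 - i).toNat := by
  have ht' : ((t.toNat : Nat) : Int) = t := Int.toNat_of_nonneg (by omega)
  induction f with
  | zero =>
      intro w i acc hw hi hiN hf
      exfalso
      push_cast at hf
      omega
  | succ f ih =>
      intro w i acc hw hi hiN hf
      have hi1 : 1 ≤ i := by nlinarith
      rw [pvWhile]
      rw [pvPat_blocks t N ht pvBase i acc hi1 hiN (fun m hm r hr => by
            have hm4 : m < 4 := by simpa [pvBase] using hm
            have h := pvVal_block t w (m:Int) (r:Int) ht (by omega) (by omega) (by omega) (by omega)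
            rw [hi]
            rw [h]
            interval_cases m <;> decide)]
      have hlen : ((pvBase.length : Nat) : Int) = 4 := by norm_num [pvBase]
      rw [hlen]
      by_cases hc : N < i + t * 4
      · rw [if_pos hc]
        rfl
      · rw [if_neg hc]
        show pvWhile t N f (i + t*4) (acc ++ pvSeg t i (t*4).toNat) = _
        rw [ih (w+1) (i + t*4) (acc ++ pvSeg t i (t*4).toNat) (by omega) (by rw [hi]; ring)
              (by omega)
              (by
                push_cast at hf ⊢
                have hexp : 4*t*((f:Int)+1) = 4*t*(f:Int) + 4*t := by ring
                omega)]
        have hsplit : (N + 1 - i).toNat = (t*4).toNat + (N + 1 - (i + t*4)).toNat := by omega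
        have e : (((t*4).toNat : Nat) : Int) = t*4 := by omega
        rw [hsplit, pvSeg_add, e, List.append_assoc]

lemma get_new_pattern_eq_seg (t N : Int) (ht : 1 ≤ t) (hN : 1 ≤ N) :
    get_new_pattern t N = pvSeg t 1 N.toNat := by
  rw [get_new_pattern, pvWhile]
  rw [pvPat_first t N ht hN []]
  by_cases hc : N < 4*t
  · rw [if_pos hc]
    show ([] : List Int) ++ pvSeg t 1 N.toNat = _
    rw [List.nil_append]
  · rw [if_neg hc]
    show pvWhile t N N.toNat (4*t) (([] : List Int) ++ pvSeg t 1 (4*t - 1).toNat) = _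
    rw [pvWhile_steady t N ht N.toNat 1 (4*t) _ (le_refl 1) (by ring) (by omega)
          (by
            have hNN : ((N.toNat : Nat) : Int) = N := by omega
            rw [hNN]
            nlinarith)]
    rw [List.nil_append]
    have hsplit : N.toNat = (4*t - 1).toNat + (N + 1 - 4*t).toNat := by omega
    have e : (((4*t - 1).toNat : Nat) : Int) = 4*t - 1 := by omega
    rw [hsplit, pvSeg_add, e]
    have e2 : (1 : Int) + (4*t - 1) = 4*t := by ring
    rw [e2]

lemma pvAlt_eq_seg (t N : Int) (f : Nat) :
    ∀ n : Int, 1 ≤ n → n + f = N + 1 → pvAlt t N f n = pvSeg t n f := by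
  induction f with
  | zero => intro n _ _; rfl
  | succ f ih =>
      intro n hn hf
      rw [pvAlt]
      by_cases h : n = N
      · have : f = 0 := by omega
        subst this h
        simp [pvSeg_one]
      · have : f ≠ 0 := by omega
        rw [if_neg h, ih (n+1) (by omega) (by push_cast at hf ⊢; omega), pvSeg_succ]

lemma alt_eq_seg (t N : Int) (hN : 1 ≤ N) :
    get_new_pattern_alt t N = pvSeg t 1 N.toNat := by
  rw [get_new_pattern_alt]
  exact pvAlt_eq_seg t N N.toNat 1 (le_refl 1) (by omega)

-- ===== VERDICT (by name: the statement is the Claim_ definition above) =====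
theorem get_new_pattern_spec : Claim_equal_get_new_pattern := by
  intro t N _ hpre
  unfold Spec_get_new_pattern
  rw [get_new_pattern_eq_seg t N hpre.1 hpre.2, alt_eq_seg t N hpre.2]
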